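-- pv_equiv track=rewrite | github.com/flannick/dig-gene-set-extractors | src/geneset_extractors/preprocessing/rnaseq/de_prepare.py | _metadata_columns_present
-- ===== SOURCE A (Python) =====
-- def _clean(value: object) -> str:
--     if value is None:
--         return ""
--     return str(value).strip()
--
-- def _metadata_columns_present(rows: list[dict[str, str]], columns: list[str]) -> tuple[list[str], list[str]]:
--     if not columns:
--         return [], []
--     present: set[str] = set()
--     populated: set[str] = set()
--     for row in rows:
--         for key, value in row.items():
--             if key:
--                 key_str = str(key)
--                 present.add(key_str)
--                 if _clean(value):
--                     populated.add(key_str)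
--     missing = [col for col in columns if col not in present]
--     blank_only = [col for col in columns if col in present and col not in populated]
--     return missing, blank_only
-- ===== SOURCE B (Python) =====
-- def _clean(value: object) -> str:
--     if value is None:
--         return ""
--     return str(value).strip()
--
-- def _metadata_columns_present(rows: list[dict[str, str]], columns: list[str]) -> tuple[list[str], list[str]]:
--     missing: list[str] = []
--     blank_only: list[str] = []
--     for col in columns:
--         if not col or not any(col in row for row in rows):
--             missing.append(col)
--         elif not any(_clean(row[col]) for row in rows if col in row):
--             blank_only.append(col)
--     return missing, blank_only
-- ===== Notes on version B (the rewrite author's own statement) =====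
-- stated objective: alternative
-- what changed: Replaces A's single global pass that accumulates 'present'/'populated' sets over all row keys with a per-column scan: for each column a short-circuiting any() over the rows decides presence and, only when present, a second any() decides whether any value is non-blank.
import Mathlib
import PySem

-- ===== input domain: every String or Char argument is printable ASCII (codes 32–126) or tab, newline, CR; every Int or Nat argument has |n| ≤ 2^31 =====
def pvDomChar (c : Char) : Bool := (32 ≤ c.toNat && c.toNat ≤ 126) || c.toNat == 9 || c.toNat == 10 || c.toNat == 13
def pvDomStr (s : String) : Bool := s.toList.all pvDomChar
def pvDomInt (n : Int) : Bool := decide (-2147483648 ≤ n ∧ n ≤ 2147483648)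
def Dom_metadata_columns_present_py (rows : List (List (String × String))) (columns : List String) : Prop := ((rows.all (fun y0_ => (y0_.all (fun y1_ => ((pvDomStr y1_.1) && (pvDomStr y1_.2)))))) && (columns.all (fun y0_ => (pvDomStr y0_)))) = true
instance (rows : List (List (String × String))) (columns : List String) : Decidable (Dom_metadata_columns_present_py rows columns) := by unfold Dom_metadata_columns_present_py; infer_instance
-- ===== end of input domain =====

-- B replaces A's global present/populated set accumulation with a per-column any() scan over the rows (alternative decomposition, same results).
-- ===== PORT A =====
-- _clean(value): values are str here, so the None branch is dead; str(value).strip()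
def mcpClean (value : String) : String := PySem.Str.strip value

-- inner loop body: 'for key, value in row.items(): if key: ...'
def mcpInner (st : PySem.Set String × PySem.Set String) (kv : String × String) :
    PySem.Set String × PySem.Set String :=
  if kv.1 ≠ "" then
    (PySem.Set.add st.1 kv.1,
     if mcpClean kv.2 ≠ "" then PySem.Set.add st.2 kv.1 else st.2)
  else st

def metadata_columns_present_py (rows : List (List (String × String))) (columns : List String) : List String × List String :=
  if columns = [] then ([], [])
  else
    let pp := rows.foldl (fun st row => (PySem.Dict.ofList row).items.foldl mcpInner st) ([], [])
    (columns.filter (fun col => !(PySem.Set.contains pp.1 col)),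
     columns.filter (fun col => PySem.Set.contains pp.1 col && !(PySem.Set.contains pp.2 col)))

-- ===== PORT B =====
-- 'not col or not any(col in row for row in rows)'
def mcpMiss (rows : List (List (String × String))) (col : String) : Bool :=
  col == "" || !(rows.any (fun row => (PySem.Dict.ofList row).contains col))

-- 'any(_clean(row[col]) for row in rows if col in row)'
def mcpPop (rows : List (List (String × String))) (col : String) : Bool :=
  rows.any (fun row =>
    (PySem.Dict.ofList row).contains col &&
      (PySem.Str.strip ((PySem.Dict.ofList row).getD col "") != ""))

def metadata_columns_present_py_alt (rows : List (List (String × String))) (columns : List String) : List String × List String :=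
  columns.foldl
    (fun acc col =>
      if mcpMiss rows col then (acc.1 ++ [col], acc.2)
      else if mcpPop rows col then acc
      else (acc.1, acc.2 ++ [col]))
    ([], [])

-- ===== PRECONDITION & SPEC =====
def Spec_metadata_columns_present_py (rows : List (List (String × String))) (columns : List String) (out : List String × List String) : Prop := out = metadata_columns_present_py_alt rows columns
instance (rows : List (List (String × String))) (columns : List String) (out : List String × List String) : Decidable (Spec_metadata_columns_present_py rows columns out) := by unfold Spec_metadata_columns_present_py; infer_instance

-- ===== CLAIM (what is proved, stated in full; the proofs are below) =====
def Claim_equal_metadata_columns_present_py : Prop := ∀ (rows : List (List (String × String))) (columns : List String), Dom_metadata_columns_present_py rows columns → Spec_metadata_columns_present_py rows columns (metadata_columns_present_py rows columns)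

-- ===== LEMMAS AND PROOFS =====

-- membership in the inner-loop accumulators, over any pair list
theorem mem_inner_fst (l : List (String × String)) (st : PySem.Set String × PySem.Set String) (c : String) :
    c ∈ (l.foldl mcpInner st).1 ↔ c ∈ st.1 ∨ (c ≠ "" ∧ ∃ v, (c, v) ∈ l) := by
  induction l generalizing st with
  | nil => simp
  | cons kv t ih =>
    obtain ⟨k, v⟩ := kv
    simp only [List.foldl_cons, mcpInner]
    split_ifs with hk hv <;>
      simp only [ih, PySem.Set.mem_add, List.mem_cons, Prod.mk.injEq] <;> aesop

theorem mem_inner_snd (l : List (String × String)) (st : PySem.Set String × PySem.Set String) (c : String) :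
    c ∈ (l.foldl mcpInner st).2 ↔ c ∈ st.2 ∨ (c ≠ "" ∧ ∃ v, (c, v) ∈ l ∧ mcpClean v ≠ "") := by
  induction l generalizing st with
  | nil => simp
  | cons kv t ih =>
    obtain ⟨k, v⟩ := kv
    simp only [List.foldl_cons, mcpInner]
    split_ifs with hk hv <;>
      simp only [ih, PySem.Set.mem_add, List.mem_cons, Prod.mk.injEq] <;> aesop

-- membership in the outer-loop accumulators
theorem mem_outer_fst (rows : List (List (String × String))) (st : PySem.Set String × PySem.Set String) (c : String) :
    c ∈ (rows.foldl (fun st row => (PySem.Dict.ofList row).items.foldl mcpInner st) st).1 ↔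
      c ∈ st.1 ∨ (c ≠ "" ∧ ∃ row ∈ rows, ∃ v, (c, v) ∈ (PySem.Dict.ofList row).items) := by
  induction rows generalizing st with
  | nil => simp
  | cons r t ih =>
    simp only [List.foldl_cons, ih, mem_inner_fst]
    constructor
    · rintro ((h | ⟨hne, v, hv⟩) | ⟨hne, row, hrow, v, hv⟩)
      · exact Or.inl h
      · exact Or.inr ⟨hne, r, List.mem_cons_self .., v, hv⟩
      · exact Or.inr ⟨hne, row, List.mem_cons_of_mem _ hrow, v, hv⟩
    · rintro (h | ⟨hne, row, hrow, v, hv⟩)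
      · exact Or.inl (Or.inl h)
      · rcases List.mem_cons.mp hrow with h1 | h1
        · exact Or.inl (Or.inr ⟨hne, v, h1 ▸ hv⟩)
        · exact Or.inr ⟨hne, row, h1, v, hv⟩

theorem mem_outer_snd (rows : List (List (String × String))) (st : PySem.Set String × PySem.Set String) (c : String) :
    c ∈ (rows.foldl (fun st row => (PySem.Dict.ofList row).items.foldl mcpInner st) st).2 ↔
      c ∈ st.2 ∨ (c ≠ "" ∧ ∃ row ∈ rows, ∃ v, (c, v) ∈ (PySem.Dict.ofList row).items ∧ mcpClean v ≠ "") := by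
  induction rows generalizing st with
  | nil => simp
  | cons r t ih =>
    simp only [List.foldl_cons, ih, mem_inner_snd]
    constructor
    · rintro ((h | ⟨hne, v, hv, hcv⟩) | ⟨hne, row, hrow, v, hv, hcv⟩)
      · exact Or.inl h
      · exact Or.inr ⟨hne, r, List.mem_cons_self .., v, hv, hcv⟩
      · exact Or.inr ⟨hne, row, List.mem_cons_of_mem _ hrow, v, hv, hcv⟩
    · rintro (h | ⟨hne, row, hrow, v, hv, hcv⟩)
      · exact Or.inl (Or.inl h)
      · rcases List.mem_cons.mp hrow with h1 | h1
        · exact Or.inl (Or.inr ⟨hne, v, h1 ▸ hv, hcv⟩)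
        · exact Or.inr ⟨hne, row, h1, v, hv, hcv⟩

-- per-row bridge: existence of a (c, v) item ↔ contains / getD on the dict
theorem exists_item_iff_contains (row : List (String × String)) (c : String) :
    (∃ v, (c, v) ∈ (PySem.Dict.ofList row).items) ↔ (PySem.Dict.ofList row).contains c = true := by
  rw [PySem.Dict.contains_iff_mem_keys]
  constructor
  · rintro ⟨v, hv⟩; exact PySem.Dict.mem_keys_of_mem_items _ hv
  · intro h
    simpa [PySem.Dict.keys, List.mem_map] using h

theorem exists_item_iff_getD (row : List (String × String)) (c : String) :
    (∃ v, (c, v) ∈ (PySem.Dict.ofList row).items ∧ mcpClean v ≠ "") ↔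
      ((PySem.Dict.ofList row).contains c = true ∧
        PySem.Str.strip ((PySem.Dict.ofList row).getD c "") ≠ "") := by
  constructor
  · rintro ⟨v, hv, hcv⟩
    refine ⟨(exists_item_iff_contains row c).mp ⟨v, hv⟩, ?_⟩
    rw [PySem.Dict.getD_of_mem_items _ hv (PySem.Dict.nodup_keys_ofList row)]
    exact hcv
  · rintro ⟨hc, hs⟩
    obtain ⟨v, hv⟩ := (exists_item_iff_contains row c).mpr hc
    refine ⟨v, hv, ?_⟩
    rwa [PySem.Dict.getD_of_mem_items _ hv (PySem.Dict.nodup_keys_ofList row)] at hs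

-- characterize B's fold as two filters
theorem foldB_eq (rows : List (List (String × String))) (cols : List String) (acc : List String × List String) :
    cols.foldl
      (fun acc col =>
        if mcpMiss rows col then (acc.1 ++ [col], acc.2)
        else if mcpPop rows col then acc
        else (acc.1, acc.2 ++ [col]))
      acc =
    (acc.1 ++ cols.filter (mcpMiss rows),
     acc.2 ++ cols.filter (fun c => !mcpMiss rows c && !mcpPop rows c)) := by
  induction cols generalizing acc with
  | nil => simp
  | cons c t ih =>
    simp only [List.foldl_cons, List.filter_cons]
    by_cases h1 : mcpMiss rows c = true
    · simp [h1, ih]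
    · by_cases h2 : mcpPop rows c = true
      · simp [h1, h2, ih]
      · simp [h1, h2, ih]

-- A's filter predicates equal B's, pointwise
theorem missPred_eq (rows : List (List (String × String))) (c : String) :
    (!(PySem.Set.contains (rows.foldl (fun st row => (PySem.Dict.ofList row).items.foldl mcpInner st) ([], [])).1 c)) =
      mcpMiss rows c := by
  have h1 := mem_outer_fst rows ([], []) c
  simp only [List.not_mem_nil, false_or] at h1
  by_cases hmem : c ∈ (rows.foldl (fun st row => (PySem.Dict.ofList row).items.foldl mcpInner st) ([], [])).1
  · have := h1.mp hmem
    obtain ⟨hne, row, hrow, hv⟩ := this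
    have hc := (exists_item_iff_contains row c).mp hv
    simp only [PySem.Set.contains_eq_listContains]
    rw [List.contains_eq_mem]
    simp only [hmem, decide_true, Bool.not_true]
    unfold mcpMiss
    have : rows.any (fun row => (PySem.Dict.ofList row).contains c) = true :=
      List.any_eq_true.mpr ⟨row, hrow, hc⟩
    simp [this, hne]
  · simp only [PySem.Set.contains_eq_listContains]
    rw [List.contains_eq_mem]
    simp only [hmem, decide_false, Bool.not_false]
    unfold mcpMiss
    by_cases hne : c = ""
    · simp [hne]
    · have hany : rows.any (fun row => (PySem.Dict.ofList row).contains c) = false := by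
        rw [Bool.eq_false_iff]
        intro h
        obtain ⟨row, hrow, hc⟩ := List.any_eq_true.mp h
        exact hmem (h1.mpr ⟨hne, row, hrow, (exists_item_iff_contains row c).mpr hc⟩)
      simp [hany]

theorem popPred_eq (rows : List (List (String × String))) (c : String) (hne : c ≠ "") :
    PySem.Set.contains (rows.foldl (fun st row => (PySem.Dict.ofList row).items.foldl mcpInner st) ([], [])).2 c =
      mcpPop rows c := by
  have h2 := mem_outer_snd rows ([], []) c
  simp only [List.not_mem_nil, false_or] at h2
  simp only [PySem.Set.contains_eq_listContains, List.contains_eq_mem]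
  by_cases hmem : c ∈ (rows.foldl (fun st row => (PySem.Dict.ofList row).items.foldl mcpInner st) ([], [])).2
  · obtain ⟨_, row, hrow, v, hv, hcv⟩ := h2.mp hmem
    have hb := (exists_item_iff_getD row c).mp ⟨v, hv, hcv⟩
    have : mcpPop rows c = true := by
      unfold mcpPop
      refine List.any_eq_true.mpr ⟨row, hrow, ?_⟩
      simp [hb.1, bne_iff_ne, hb.2]
    simp [hmem, this]
  · have : mcpPop rows c = false := by
      rw [Bool.eq_false_iff]
      intro h
      obtain ⟨row, hrow, hb⟩ := List.any_eq_true.mp h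
      rw [Bool.and_eq_true] at hb
      have hgd : PySem.Str.strip ((PySem.Dict.ofList row).getD c "") ≠ "" := by
        simpa [bne_iff_ne] using hb.2
      obtain ⟨v, hv, hcv⟩ := (exists_item_iff_getD row c).mpr ⟨hb.1, hgd⟩
      exact hmem (h2.mpr ⟨hne, row, hrow, v, hv, hcv⟩)
    simp [hmem, this]

theorem blankPred_eq (rows : List (List (String × String))) (c : String) :
    ((PySem.Set.contains (rows.foldl (fun st row => (PySem.Dict.ofList row).items.foldl mcpInner st) ([], [])).1 c) &&
      !(PySem.Set.contains (rows.foldl (fun st row => (PySem.Dict.ofList row).items.foldl mcpInner st) ([], [])).2 c)) =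
      (!mcpMiss rows c && !mcpPop rows c) := by
  have hmiss := missPred_eq rows c
  by_cases hne : c = ""
  · have h1 := mem_outer_fst rows ([], []) c
    simp only [List.not_mem_nil, false_or] at h1
    have hnp : c ∉ (rows.foldl (fun st row => (PySem.Dict.ofList row).items.foldl mcpInner st) ([], [])).1 := by
      intro h
      exact absurd hne (h1.mp h).1
    have hm : mcpMiss rows c = true := by unfold mcpMiss; simp [hne]
    simp only [PySem.Set.contains_eq_listContains, List.contains_eq_mem]
    simp [hnp, hm]
  · have hp := popPred_eq rows c hne
    have : PySem.Set.contains (rows.foldl (fun st row => (PySem.Dict.ofList row).items.foldl mcpInner st) ([], [])).1 c = !mcpMiss rows c := by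
      rw [← hmiss, Bool.not_not]
    rw [this, hp]

-- ===== VERDICT (by name: the statement is the Claim_ definition above) =====
theorem metadata_columns_present_py_spec : Claim_equal_metadata_columns_present_py := by
  intro rows columns _
  unfold Spec_metadata_columns_present_py metadata_columns_present_py metadata_columns_present_py_alt
  rw [foldB_eq]
  by_cases hc : columns = []
  · simp [hc]
  · simp only [hc, if_false, List.nil_append]
    exact Prod.ext (List.filter_congr (fun c _ => missPred_eq rows c))
      (List.filter_congr (fun c _ => blankPred_eq rows c))
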